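-- pv_equiv track=rewrite | github.com/raffelprama/trello-agent | app/nodes/entity_resolver.py | _cards_matching
-- ===== SOURCE A (Python) =====
-- from typing import Any
--
-- def _norm(s: str | None) -> str:
--     return (s or "").strip().lower()
--
-- def _cards_matching(name: str, all_cards: list[dict[str, Any]]) -> list[dict[str, Any]]:
--     want = _norm(name)
--     if not want:
--         return []
--     # Prefer exact matches — only fall back to substring when nothing exact exists
--     exact = [c for c in all_cards if _norm(c.get("name")) == want]
--     if exact:
--         return exact
--     return [
--         c for c in all_cards
--         if want in _norm(c.get("name") or "") or _norm(c.get("name") or "") in want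
--     ]
-- ===== SOURCE B (Python) =====
-- def _norm(s):
--     return (s or "").strip().lower()
--
-- def _cards_matching(name, all_cards):
--     want = _norm(name)
--     if not want:
--         return []
--     exact = []
--     sub = []
--     for c in all_cards:
--         n = _norm(c.get("name"))
--         if n == want:
--             exact.append(c)
--         elif want in n or n in want:
--             sub.append(c)
--     return exact if exact else sub
-- ===== Notes on version B (the rewrite author's own statement) =====
-- stated objective: simpler
-- what changed: Replaces A's two separate list comprehensions over all_cards with one single pass that buckets each card into an exact list or (elif) a substring list, then returns exact-or-sub.
import Mathlib
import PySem

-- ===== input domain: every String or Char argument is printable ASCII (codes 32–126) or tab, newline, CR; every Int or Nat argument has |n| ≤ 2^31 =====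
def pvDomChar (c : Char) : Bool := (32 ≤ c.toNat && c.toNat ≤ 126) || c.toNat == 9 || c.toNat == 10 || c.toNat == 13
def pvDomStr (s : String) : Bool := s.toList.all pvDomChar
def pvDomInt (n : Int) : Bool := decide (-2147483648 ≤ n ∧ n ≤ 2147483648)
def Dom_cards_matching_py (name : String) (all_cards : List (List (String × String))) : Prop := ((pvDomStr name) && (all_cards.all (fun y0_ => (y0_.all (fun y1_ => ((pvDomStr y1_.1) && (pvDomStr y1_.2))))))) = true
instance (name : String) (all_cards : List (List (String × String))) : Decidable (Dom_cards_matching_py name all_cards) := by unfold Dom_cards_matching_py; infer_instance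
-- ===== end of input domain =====

-- B replaces A's two separate list comprehensions with one single-pass loop bucketing
-- each card into an exact or substring list (objective: simpler, one traversal).


-- ===== PORT A =====
-- c.get("name"): first-match lookup in the association list
def pvGetName (c : List (String × String)) : Option String := (PySem.Dict.mk c).get? "name"
-- _norm(s): (s or "").strip().lower(); the Option models `c.get("name")` possibly missing
def pvNorm (s : Option String) : String := PySem.Str.lower (PySem.Str.strip (s.getD ""))

def cards_matching_py (name : String) (all_cards : List (List (String × String))) : List (List (String × String)) :=
  let want := pvNorm (some name)
  if want = "" then []
  else
    let exact := all_cards.filter (fun c => pvNorm (pvGetName c) == want)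
    if exact ≠ [] then exact
    else all_cards.filter (fun c =>
      PySem.Str.isIn want (pvNorm (pvGetName c)) ||
      PySem.Str.isIn (pvNorm (pvGetName c)) want)

-- ===== PORT B =====
def cards_matching_py_alt (name : String) (all_cards : List (List (String × String))) : List (List (String × String)) :=
  let want := pvNorm (some name)
  if want = "" then []
  else
    let p := all_cards.foldl (fun (acc : List (List (String × String)) × List (List (String × String))) c =>
      let n := pvNorm (pvGetName c)
      if n == want then (acc.1 ++ [c], acc.2)
      else if PySem.Str.isIn want n || PySem.Str.isIn n want then (acc.1, acc.2 ++ [c])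
      else acc) ([], [])
    if p.1 ≠ [] then p.1 else p.2

-- ===== PRECONDITION & SPEC =====
def Spec_cards_matching_py (name : String) (all_cards : List (List (String × String))) (out : List (List (String × String))) : Prop := out = cards_matching_py_alt name all_cards
instance (name : String) (all_cards : List (List (String × String))) (out : List (List (String × String))) : Decidable (Spec_cards_matching_py name all_cards out) := by unfold Spec_cards_matching_py; infer_instance

-- ===== CLAIM (what is proved, stated in full; the proofs are below) =====
def Claim_equal_cards_matching_py : Prop := ∀ (name : String) (all_cards : List (List (String × String))), Dom_cards_matching_py name all_cards → Spec_cards_matching_py name all_cards (cards_matching_py name all_cards)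

-- ===== LEMMAS AND PROOFS =====

-- B's single fold accumulates exactly A's two filters (the elif strips exact matches from the sub bucket)
theorem pv_foldl_buckets (want : String) (xs : List (List (String × String)))
    (e s : List (List (String × String))) :
    xs.foldl (fun (acc : List (List (String × String)) × List (List (String × String))) c =>
      let n := pvNorm (pvGetName c)
      if n == want then (acc.1 ++ [c], acc.2)
      else if PySem.Str.isIn want n || PySem.Str.isIn n want then (acc.1, acc.2 ++ [c])
      else acc) (e, s)
    = (e ++ xs.filter (fun c => pvNorm (pvGetName c) == want),
       s ++ xs.filter (fun c => !(pvNorm (pvGetName c) == want) &&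
         (PySem.Str.isIn want (pvNorm (pvGetName c)) ||
          PySem.Str.isIn (pvNorm (pvGetName c)) want))) := by
  induction xs generalizing e s with
  | nil => simp
  | cons c t ih =>
    rw [List.foldl_cons, List.filter_cons, List.filter_cons]
    cases hb : pvNorm (pvGetName c) == want with
    | true =>
      simp only [hb, if_true, Bool.not_true, Bool.false_and, Bool.false_eq_true, if_false]
      rw [ih]
      simp
    | false =>
      cases hb2 : (PySem.Str.isIn want (pvNorm (pvGetName c)) || PySem.Str.isIn (pvNorm (pvGetName c)) want) with
      | true =>
        simp only [hb, hb2, Bool.false_eq_true, if_false, if_true, Bool.not_false, Bool.true_and]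
        rw [ih]
        simp
      | false =>
        simp only [hb, hb2, Bool.false_eq_true, if_false, Bool.not_false, Bool.true_and]
        exact ih e s

theorem cards_matching_py_spec : Claim_equal_cards_matching_py := by
  intro name all_cards _
  show cards_matching_py name all_cards = cards_matching_py_alt name all_cards
  unfold cards_matching_py cards_matching_py_alt
  by_cases hw : pvNorm (some name) = ""
  · simp [hw]
  · simp only [hw, if_false, pv_foldl_buckets, List.nil_append]
    by_cases he : all_cards.filter (fun c => pvNorm (pvGetName c) == pvNorm (some name)) ≠ []
    · simp [he]
    · push_neg at he
      simp only [he, ne_eq, not_true_eq_false, if_false]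
      apply List.filter_congr
      intro c hc
      have : ¬ (pvNorm (pvGetName c) == pvNorm (some name)) := by
        intro h
        have := List.filter_eq_nil_iff.mp he c hc
        simp_all
      simp [this]
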